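-- pv_equiv track=rewrite | github.com/casebor/labbit_scripts | care_sort_brenda_by_subs_qtty.py | _get_protein_name
-- ===== SOURCE A (Python) =====
-- def _get_protein_name(line):
--     if line != '':
--         stop_counter = 2
--         parse_name = ''
--         for char in line:
--             if char in '<>()':
--                 return parse_name.strip()
--             elif char == '#':
--                 stop_counter -= 1
--             else:
--                 if stop_counter == 0:
--                     parse_name += char
-- ===== SOURCE B (Python) =====
-- def _get_protein_name(line):
--     for i, ch in enumerate(line):
--         if ch in '<>()':
--             parts = line[:i].split('#')
--             return parts[2].strip() if len(parts) >= 3 else ''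
--     return None
-- ===== Notes on version B (the rewrite author's own statement) =====
-- stated objective: idiomatic
-- what changed: Replaces the character-by-character state machine (hash countdown counter plus incremental string accumulator) by locating the first delimiter, slicing the prefix and taking the third hash-separated field with str.split.
import Mathlib
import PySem

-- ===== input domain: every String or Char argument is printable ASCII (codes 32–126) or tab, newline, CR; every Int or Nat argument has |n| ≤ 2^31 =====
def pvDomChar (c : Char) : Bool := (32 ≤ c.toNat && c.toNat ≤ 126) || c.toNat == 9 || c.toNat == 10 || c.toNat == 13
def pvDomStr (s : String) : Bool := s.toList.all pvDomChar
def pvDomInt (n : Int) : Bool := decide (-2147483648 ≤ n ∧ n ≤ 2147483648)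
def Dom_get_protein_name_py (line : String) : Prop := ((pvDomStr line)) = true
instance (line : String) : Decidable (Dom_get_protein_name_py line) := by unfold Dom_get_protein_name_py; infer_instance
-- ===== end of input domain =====

-- B replaces A's char-by-char countdown state machine by delimiter-find + slice + '#'-split (idiomatic decomposition).


-- ===== PORT A =====
-- A's for-loop: stop_counter / parse_name state machine over the characters.
def getProteinLoopA : List Char → Int → List Char → Option String
  | [], _, _ => none
  | c :: rest, sc, acc =>
    if c ∈ (['<', '>', '(', ')'] : List Char) then some (String.ofList (PySem.Chars.strip acc))
    else if c = '#' then getProteinLoopA rest (sc - 1) acc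
    else if sc = 0 then getProteinLoopA rest sc (acc ++ [c])
    else getProteinLoopA rest sc acc

def get_protein_name_py (line : String) : Option String :=
  if line.toList ≠ [] then getProteinLoopA line.toList 2 [] else none

-- ===== PORT B =====
-- B's for-loop over enumerate(line): find the first delimiter, then slice + split('#').
def getProteinLoopB (line : List Char) : List Char → Nat → Option String
  | [], _ => none
  | ch :: rest, i =>
    if ch ∈ (['<', '>', '(', ')'] : List Char) then
      let parts := PySem.Chars.splitOn (PySem.List.slice line none (some (i : Int))) ['#']
      some (if 3 ≤ parts.length then String.ofList (PySem.Chars.strip (parts.getD 2 [])) else "")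
    else getProteinLoopB line rest (i + 1)

def get_protein_name_py_alt (line : String) : Option String :=
  getProteinLoopB line.toList line.toList 0

-- ===== PRECONDITION & SPEC =====
def Spec_get_protein_name_py (line : String) (out : Option String) : Prop := out = get_protein_name_py_alt line
instance (line : String) (out : Option String) : Decidable (Spec_get_protein_name_py line out) := by unfold Spec_get_protein_name_py; infer_instance

-- ===== CLAIM (what is proved, stated in full; the proofs are below) =====
def Claim_equal_get_protein_name_py : Prop := ∀ (line : String), Dom_get_protein_name_py line → Spec_get_protein_name_py line (get_protein_name_py line)

-- ===== LEMMAS AND PROOFS =====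

-- cons-recursive characterisation of split on '#'
def hsplit : List Char → List (List Char)
  | [] => [[]]
  | c :: r => if c = '#' then [] :: hsplit r else (hsplit r).modifyHead (c :: ·)

lemma hsplit_ne_nil (l : List Char) : hsplit l ≠ [] := by
  induction l with
  | nil => simp [hsplit]
  | cons c r ih =>
    simp only [hsplit]
    split_ifs
    · simp
    · cases h : hsplit r with
      | nil => exact absurd h ih
      | cons a t => simp [List.modifyHead]

lemma go_spec : ∀ (fuel : Nat) (l cur : List Char) (acc : List (List Char)),
    l.length < fuel →
    PySem.Chars.splitOn.go ['#'] fuel l cur acc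
      = acc.reverse ++ (hsplit l).modifyHead (cur.reverse ++ ·) := by
  intro fuel
  induction fuel with
  | zero => intro l cur acc h; omega
  | succ f ih =>
    intro l cur acc h
    cases l with
    | nil => simp [PySem.Chars.splitOn.go, hsplit]
    | cons c rest =>
      simp only [PySem.Chars.splitOn.go, List.isPrefixOf]
      by_cases hc : c = '#'
      · subst hc
        rw [if_pos (by simp)]
        rw [show List.drop ['#'].length ('#' :: rest) = rest from rfl]
        rw [ih]
        · simp only [hsplit]
          cases hr : hsplit rest with
          | nil => exact absurd hr (hsplit_ne_nil rest)
          | cons a t => simp [List.modifyHead]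
        · simp at h; omega
      · rw [if_neg (by simp; exact fun hx => absurd hx.symm hc)]
        rw [ih]
        · simp only [hsplit, if_neg hc]
          cases hr : hsplit rest with
          | nil => exact absurd hr (hsplit_ne_nil rest)
          | cons h t => simp [List.modifyHead]
        · simp at h ⊢; omega

lemma splitOn_eq_hsplit (l : List Char) : PySem.Chars.splitOn l ['#'] = hsplit l := by
  unfold PySem.Chars.splitOn
  rw [go_spec _ _ _ _ (by omega)]
  cases hr : hsplit l with
  | nil => exact absurd hr (hsplit_ne_nil l)
  | cons h t => simp [List.modifyHead]

lemma hsplit_snoc_hash (l : List Char) : hsplit (l ++ ['#']) = hsplit l ++ [[]] := by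
  induction l with
  | nil => simp [hsplit]
  | cons c r ih =>
    simp only [List.cons_append, hsplit, ih]
    split_ifs
    · rfl
    · cases hr : hsplit r with
      | nil => exact absurd hr (hsplit_ne_nil r)
      | cons h t => simp [List.modifyHead]

lemma hsplit_snoc (l : List Char) (c : Char) (hc : c ≠ '#') :
    hsplit (l ++ [c]) = (hsplit l).dropLast ++ [(hsplit l).getLastD [] ++ [c]] := by
  induction l with
  | nil => simp [hsplit, hc]
  | cons d r ih =>
    simp only [List.cons_append, hsplit]
    split_ifs with hd
    · rw [ih]
      cases hr : hsplit r with
      | nil => exact absurd hr (hsplit_ne_nil r)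
      | cons a t => cases t <;> simp
    · rw [ih]
      cases hr : hsplit r with
      | nil => exact absurd hr (hsplit_ne_nil r)
      | cons a t => cases t <;> simp [List.modifyHead]

lemma length_hsplit (l : List Char) : (hsplit l).length = l.count '#' + 1 := by
  induction l with
  | nil => simp [hsplit]
  | cons c r ih =>
    simp only [hsplit]
    split_ifs with hc
    · simp [hc, ih]
    · cases hr : hsplit r with
      | nil => exact absurd hr (hsplit_ne_nil r)
      | cons h t => simp [hc, hr] at ih ⊢; omega

-- A's loop state as a fold over the consumed prefix
def stA (s : Int × List Char) (c : Char) : Int × List Char :=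
  if c = '#' then (s.1 - 1, s.2)
  else if s.1 = 0 then (s.1, s.2 ++ [c]) else s

def accOf (p : List Char) : List Char :=
  if 3 ≤ (hsplit p).length then (hsplit p).getD 2 [] else []

lemma accOf_snoc_hash (p : List Char) : accOf (p ++ ['#']) = accOf p := by
  unfold accOf
  rw [hsplit_snoc_hash]
  have hlen := length_hsplit p
  have hne := hsplit_ne_nil p
  by_cases h3 : 3 ≤ (hsplit p).length
  · rw [if_pos (by simp; omega), if_pos h3]
    rw [List.getD_append _ _ _ _ (by omega)]
  · rw [if_neg h3]
    by_cases h3' : 3 ≤ (hsplit p ++ [[]]).length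
    · rw [if_pos h3']
      simp at h3'
      have hlen2 : (hsplit p).length = 2 := by omega
      simp [List.getD_eq_getElem?_getD, hlen2]
    · rw [if_neg h3']

lemma accOf_snoc (p : List Char) (c : Char) (hc : c ≠ '#') :
    accOf (p ++ [c]) = if p.count '#' = 2 then accOf p ++ [c] else accOf p := by
  unfold accOf
  rw [hsplit_snoc p c hc]
  have hlen := length_hsplit p
  have hne := hsplit_ne_nil p
  have hlen' : ((hsplit p).dropLast ++ [(hsplit p).getLastD [] ++ [c]]).length
      = (hsplit p).length := by
    simp [List.length_dropLast]
    omega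
  by_cases hcount : p.count '#' = 2
  · have h3 : (hsplit p).length = 3 := by omega
    rw [if_pos hcount, if_pos (by omega), if_pos (by omega)]
    match hs : hsplit p, h3' : h3 with
    | [a, b, d], _ => simp
  · rw [if_neg hcount]
    by_cases h3 : 3 ≤ (hsplit p).length
    · have h4 : 4 ≤ (hsplit p).length := by omega
      rw [if_pos (by omega), if_pos h3]
      simp only [List.getD_eq_getElem?_getD]
      rw [List.getElem?_append_left (by simp [List.length_dropLast]; omega)]
      rw [List.getElem?_dropLast]
      simp [show 2 < (hsplit p).length - 1 by omega]
    · rw [if_neg (by omega), if_neg h3]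

lemma charA (p : List Char) :
    p.foldl stA (2, []) = (2 - (p.count '#' : Int), accOf p) := by
  induction p using List.reverseRecOn with
  | nil => simp [accOf, hsplit]
  | append_singleton p c ih =>
    rw [List.foldl_append, ih]
    simp only [List.foldl_cons, List.foldl_nil, stA]
    by_cases hc : c = '#'
    · subst hc
      rw [if_pos rfl, accOf_snoc_hash]
      simp [List.count_append]
      omega
    · rw [if_neg hc, accOf_snoc p c hc]
      have : (p.count '#' : Int) = ((p ++ [c]).count '#' : Int) := by
        simp [List.count_append, hc]
      by_cases h0 : (2 : Int) - (p.count '#' : Int) = 0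
      · have hcnt : p.count '#' = 2 := by omega
        rw [if_pos h0, if_pos hcnt]
        simp [List.count_append, hc]
      · have hcnt : p.count '#' ≠ 2 := by omega
        rw [if_neg h0, if_neg hcnt]
        simp [List.count_append, hc]

lemma key : ∀ (rest p : List Char),
    getProteinLoopB (p ++ rest) rest p.length
      = getProteinLoopA rest (p.foldl stA (2, [])).1 (p.foldl stA (2, [])).2 := by
  intro rest
  induction rest with
  | nil => intro p; simp [getProteinLoopA, getProteinLoopB]
  | cons ch rest ih =>
    intro p
    rw [getProteinLoopA, getProteinLoopB]
    by_cases hd : ch ∈ (['<', '>', '(', ')'] : List Char)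
    · rw [if_pos hd, if_pos hd]
      have hslice : PySem.List.slice (p ++ ch :: rest) none (some ((p.length : Nat) : Int))
          = p := by
        rw [PySem.List.slice_to_natCast]
        exact List.take_left
      rw [hslice, splitOn_eq_hsplit, charA]
      show some (if 3 ≤ (hsplit p).length then String.ofList (PySem.Chars.strip ((hsplit p).getD 2 [])) else "")
          = some (String.ofList (PySem.Chars.strip (accOf p)))
      by_cases h3 : 3 ≤ (hsplit p).length
      · rw [if_pos h3]
        simp [accOf, h3]
      · rw [if_neg h3]
        simp only [accOf, if_neg h3]
        simp only [PySem.Chars.strip]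
        decide
    · rw [if_neg hd, if_neg hd]
      have heq : p ++ ch :: rest = (p ++ [ch]) ++ rest := by simp
      have hlen : p.length + 1 = (p ++ [ch]).length := by simp
      rw [heq, hlen, ih (p ++ [ch])]
      rw [List.foldl_append]
      simp only [List.foldl_cons, List.foldl_nil, stA]
      split_ifs <;> rfl

-- ===== VERDICT (by name: the statement is the Claim_ definition above) =====
theorem get_protein_name_py_spec : Claim_equal_get_protein_name_py := by
  intro line _
  unfold Spec_get_protein_name_py get_protein_name_py get_protein_name_py_alt
  cases h : line.toList with
  | nil => simp [getProteinLoopB]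
  | cons c r =>
    simp only [ne_eq, reduceCtorEq, not_false_iff, if_true]
    have := key (c :: r) []
    simpa using this.symm
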